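-- pv_equiv track=rewrite | github.com/asiffer/libspot | dev/doxygen/parser.py | c_to_py_type
-- ===== SOURCE A (Python) =====
-- def c_to_py_type(c_type: str) -> str:
--     c_type = (
--         c_type.replace("const", "")
--         .replace("struct", "")
--         .replace("(", " ")
--         .strip()
--     )
--
--     if "enum" in c_type:
--         return "c_int"
--
--     # pointer case
--     if c_type.endswith("*"):
--         base = c_type[:-1].strip()
--         if base == "void":
--             return "c_void_p"
--         elif base == "char":
--             return "c_char_p"
--         return f"POINTER({c_to_py_type(base)})"
--
--     return {
--         "int": "c_int",
--         "char": "c_char",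
--         "double": "c_double",
--         "unsigned long": "c_ulong",
--         "void": "None",
--     }.get(c_type, c_type)
-- ===== SOURCE B (Python) =====
-- _TABLE = {
--     "int": "c_int",
--     "char": "c_char",
--     "double": "c_double",
--     "unsigned long": "c_ulong",
--     "void": "None",
-- }
--
-- def c_to_py_type(c_type: str) -> str:
--     cur = (
--         c_type.replace("const", "")
--         .replace("struct", "")
--         .replace("(", " ")
--         .strip()
--     )
--
--     if "enum" in cur:
--         return "c_int"
--
--     # peel trailing '*' one level at a time, counting POINTER() wrappers
--     wraps = 0
--     inner = None
--     while cur.endswith("*"):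
--         base = cur[:-1].strip()
--         if base == "void":
--             inner = "c_void_p"
--             break
--         if base == "char":
--             inner = "c_char_p"
--             break
--         wraps += 1
--         cur = base
--     if inner is None:
--         inner = _TABLE.get(cur, cur)
--     return "POINTER(" * wraps + inner + ")" * wraps
-- ===== Notes on version B (the rewrite author's own statement) =====
-- stated objective: alternative
-- what changed: The recursion on the pointer base (which re-runs the const/struct/paren replacements and the enum check at every level) is replaced by a single iterative peel loop that counts '*' levels and wraps the innermost result in POINTER(...) once per counted level at the end.
-- outside the precondition, e.g. on c_to_py_type('conconstst*'): A returns 'POINTER()', B returns 'POINTER(const)'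
import Mathlib
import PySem

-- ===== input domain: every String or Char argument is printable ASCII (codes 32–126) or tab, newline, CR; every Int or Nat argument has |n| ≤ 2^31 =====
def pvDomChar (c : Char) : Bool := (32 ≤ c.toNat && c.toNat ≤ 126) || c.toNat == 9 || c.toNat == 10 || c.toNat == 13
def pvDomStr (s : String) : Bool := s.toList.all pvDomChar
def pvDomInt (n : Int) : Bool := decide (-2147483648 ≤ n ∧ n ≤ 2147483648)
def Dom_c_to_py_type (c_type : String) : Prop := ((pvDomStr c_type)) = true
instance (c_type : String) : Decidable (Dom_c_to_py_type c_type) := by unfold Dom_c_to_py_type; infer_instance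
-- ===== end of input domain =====

-- B replaces A's per-level recursion (which re-runs the replacements and the enum check) by one
-- iterative peel loop counting '*' levels, wrapping the innermost result in POINTER(...) at the end.

-- ===== PORT A =====
-- shared normalization: c_type.replace("const","").replace("struct","").replace("(", " ").strip()
def pvNorm (s : List Char) : List Char :=
  PySem.Chars.strip
    (PySem.Chars.replace
      (PySem.Chars.replace (PySem.Chars.replace s "const".toList "".toList) "struct".toList "".toList)
      "(".toList " ".toList)

-- the literal dict of the return statement (shared by both Pythons)
def pvTable : PySem.Dict (List Char) (List Char) :=
  PySem.Dict.ofList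
    [("int".toList, "c_int".toList), ("char".toList, "c_char".toList),
     ("double".toList, "c_double".toList), ("unsigned long".toList, "c_ulong".toList),
     ("void".toList, "None".toList)]

-- A's recursion, fuel only as a totalization guard (the depth is bounded by the string length)
def aGo : Nat → List Char → List Char
  | 0, _ => []
  | fuel + 1, s =>
    let cur := pvNorm s
    if PySem.Chars.isIn "enum".toList cur then "c_int".toList
    else if PySem.Chars.endswith cur "*".toList then
      let base := PySem.Chars.strip (PySem.List.slice cur none (some (-1)))
      if base = "void".toList then "c_void_p".toList
      else if base = "char".toList then "c_char_p".toList
      else "POINTER(".toList ++ aGo fuel base ++ ")".toList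
    else pvTable.getD cur cur

def c_to_py_type (c_type : String) : String :=
  String.ofList (aGo (c_type.toList.length + 1) c_type.toList)

-- ===== PORT B =====
-- the while loop: peel one '*' per step, counting wrappers; fuel is only a totalization guard
def bPeel : Nat → List Char → Nat → List Char × Nat
  | 0, _, wraps => ([], wraps)
  | fuel + 1, cur, wraps =>
    if PySem.Chars.endswith cur "*".toList then
      let base := PySem.Chars.strip (PySem.List.slice cur none (some (-1)))
      if base = "void".toList then ("c_void_p".toList, wraps)
      else if base = "char".toList then ("c_char_p".toList, wraps)
      else bPeel fuel base (wraps + 1)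
    else (pvTable.getD cur cur, wraps)

-- "POINTER(" * wraps + inner + ")" * wraps
def pvWrap (wraps : Nat) (inner : List Char) : List Char :=
  (List.replicate wraps "POINTER(".toList).flatten ++ inner ++ List.replicate wraps ')'

def c_to_py_type_alt (c_type : String) : String :=
  let cur := pvNorm c_type.toList
  if PySem.Chars.isIn "enum".toList cur then "c_int"
  else
    let r := bPeel (cur.length + 1) cur 0
    String.ofList (pvWrap r.2 r.1)

-- ===== PRECONDITION & SPEC =====
-- Pre_ excludes degenerate inputs on which the single-pass removal of "const"/"struct" re-creates
-- that very token (e.g. "conconstst*"): A's recursive calls re-run the replacements and strip it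
-- again per pointer level — an artefact of re-normalization — while B normalizes once and keeps it.
def Pre_c_to_py_type (c_type : String) : Prop :=
  PySem.Str.isIn "const" (PySem.Str.replace (PySem.Str.replace c_type "const" "") "struct" "") = false ∧
  PySem.Str.isIn "struct" (PySem.Str.replace (PySem.Str.replace c_type "const" "") "struct" "") = false
instance (c_type : String) : Decidable (Pre_c_to_py_type c_type) := by unfold Pre_c_to_py_type; infer_instance
def pvWitness_c_to_py_type : String := "const char **"

def Spec_c_to_py_type (c_type : String) (out : String) : Prop := out = c_to_py_type_alt c_type
instance (c_type : String) (out : String) : Decidable (Spec_c_to_py_type c_type out) := by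
  unfold Spec_c_to_py_type; infer_instance

-- ===== CLAIM (what is proved, stated in full; the proofs are below) =====
def Claim_equal_c_to_py_type : Prop :=
  ∀ (c_type : String), Dom_c_to_py_type c_type → Pre_c_to_py_type c_type →
    Spec_c_to_py_type c_type (c_to_py_type c_type)

-- ===== LEMMAS AND PROOFS =====

theorem go_no_occ (old new : List Char) : ∀ (fuel : Nat) (l acc : List Char),
    ¬ old <:+: l → PySem.Chars.replace.go old new fuel l acc = acc.reverse ++ l := by
  intro fuel
  induction fuel with
  | zero => intro l acc h; simp [PySem.Chars.replace.go]
  | succ n ih =>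
    intro l acc h
    cases l with
    | nil => simp [PySem.Chars.replace.go]
    | cons c t =>
      have hp : old.isPrefixOf (c :: t) = false := by
        rw [Bool.eq_false_iff]
        intro hc
        exact h (List.IsPrefix.isInfix (List.isPrefixOf_iff_prefix.mp hc))
      have ht : ¬ old <:+: t := fun hc => h (hc.trans (List.suffix_cons c t).isInfix)
      simp only [PySem.Chars.replace.go, hp, Bool.false_eq_true, if_false]
      rw [ih t (c :: acc) ht]
      simp

theorem replace_no_occ (l old new : List Char) (h : ¬ old <:+: l) (h0 : old ≠ []) :
    PySem.Chars.replace l old new = l := by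
  unfold PySem.Chars.replace
  rw [if_neg (by simpa using h0)]
  simpa using go_no_occ old new l.length l [] h

theorem go_single (a b : Char) : ∀ (fuel : Nat) (l acc : List Char), l.length ≤ fuel →
    PySem.Chars.replace.go [a] [b] fuel l acc
      = acc.reverse ++ l.map (fun c => if c = a then b else c) := by
  intro fuel
  induction fuel with
  | zero =>
    intro l acc h
    cases l with
    | nil => simp [PySem.Chars.replace.go]
    | cons c t => simp at h
  | succ n ih =>
    intro l acc h
    cases l with
    | nil => simp [PySem.Chars.replace.go]
    | cons c t =>
      have ht : t.length ≤ n := by simpa using h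
      by_cases hc : c = a
      · have hp : List.isPrefixOf [a] (c :: t) = true := by
          subst hc; simp
        simp only [PySem.Chars.replace.go, hp, if_true]
        rw [show List.drop (List.length [a]) (c :: t) = t by simp]
        rw [ih t ([b].reverse ++ acc) ht]
        simp [hc]
      · have hp : List.isPrefixOf [a] (c :: t) = false := by
          rw [Bool.eq_false_iff]; intro hcc
          rcases List.isPrefixOf_iff_prefix.mp hcc with ⟨s, hs⟩
          simp at hs; exact hc hs.1.symm
        simp only [PySem.Chars.replace.go, hp, Bool.false_eq_true, if_false]
        rw [ih t (c :: acc) ht]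
        simp [hc]

theorem replace_single (l : List Char) (a b : Char) :
    PySem.Chars.replace l [a] [b] = l.map (fun c => if c = a then b else c) := by
  unfold PySem.Chars.replace
  rw [if_neg (by simp)]
  simpa using go_single a b l.length l [] le_rfl

theorem lstrip_suffix (l : List Char) : PySem.Chars.lstrip l <:+ l :=
  List.dropWhile_suffix _

theorem rstrip_prefix (l : List Char) : PySem.Chars.rstrip l <+: l := by
  rw [← List.reverse_suffix]
  simpa [PySem.Chars.rstrip] using List.dropWhile_suffix (l := l.reverse) PySem.Chars.isspace

theorem strip_infix (l : List Char) : PySem.Chars.strip l <:+: l :=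
  (List.IsPrefix.isInfix (rstrip_prefix _)).trans (List.IsSuffix.isInfix (lstrip_suffix l))

theorem strip_length_le (l : List Char) : (PySem.Chars.strip l).length ≤ l.length :=
  (strip_infix l).sublist.length_le

theorem lstrip_of_prefix_lstrip (x y : List Char) (h : y <+: PySem.Chars.lstrip x) :
    PySem.Chars.lstrip y = y := by
  cases hy : PySem.Chars.lstrip x with
  | nil =>
    have : y = [] := List.prefix_nil.mp (hy ▸ h)
    simp [this, PySem.Chars.lstrip]
  | cons c t =>
    have hc : PySem.Chars.isspace c = false := by
      have := List.head_dropWhile_not (p := PySem.Chars.isspace) (l := x)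
      simp only [PySem.Chars.lstrip] at hy
      rw [hy] at this
      simpa using this (by simp)
    rcases h with ⟨s, hs⟩
    rw [hy] at hs
    cases y with
    | nil => simp [PySem.Chars.lstrip]
    | cons d u =>
      have hd : d = c := by
        have := congrArg (List.head? ·) hs
        simpa using this
      simp [PySem.Chars.lstrip, hd, hc]

theorem rstrip_idem (l : List Char) :
    PySem.Chars.rstrip (PySem.Chars.rstrip l) = PySem.Chars.rstrip l := by
  simp [PySem.Chars.rstrip, List.dropWhile_idempotent]

theorem strip_idem (l : List Char) :
    PySem.Chars.strip (PySem.Chars.strip l) = PySem.Chars.strip l := by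
  simp only [PySem.Chars.strip]
  rw [lstrip_of_prefix_lstrip l _ (rstrip_prefix _), rstrip_idem]

theorem go_nil_length (old : List Char) : ∀ (fuel : Nat) (l acc : List Char),
    (PySem.Chars.replace.go old [] fuel l acc).length ≤ acc.length + l.length := by
  intro fuel
  induction fuel with
  | zero => intro l acc; simp [PySem.Chars.replace.go]
  | succ n ih =>
    intro l acc
    cases l with
    | nil => simp [PySem.Chars.replace.go]
    | cons c t =>
      by_cases hp : old.isPrefixOf (c :: t) = true
      · simp only [PySem.Chars.replace.go, hp, if_true]
        calc (PySem.Chars.replace.go old [] n (List.drop old.length (c :: t)) (List.reverse [] ++ acc)).length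
            ≤ (List.reverse [] ++ acc).length + (List.drop old.length (c :: t)).length := ih _ _
          _ ≤ acc.length + (c :: t).length := by
              simp only [List.length_append, List.length_reverse, List.length_drop, List.length_cons, List.length_nil]; omega
      · simp only [PySem.Chars.replace.go, hp, Bool.false_eq_true, if_false]
        calc (PySem.Chars.replace.go old [] n t (c :: acc)).length
            ≤ (c :: acc).length + t.length := ih _ _
          _ ≤ acc.length + (c :: t).length := by simp; omega

theorem replace_nil_length (l old : List Char) (h0 : old ≠ []) :
    (PySem.Chars.replace l old []).length ≤ l.length := by
  unfold PySem.Chars.replace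
  rw [if_neg (by simpa using h0)]
  simpa using go_nil_length old l.length l []

theorem map_eq_self_of_no_b (a b : Char) : ∀ (m tok : List Char),
    m.map (fun c => if c = a then b else c) = tok → b ∉ tok → m = tok := by
  intro m
  induction m with
  | nil => intro tok h _; simpa using h.symm
  | cons c t ih =>
    intro tok h hb
    cases tok with
    | nil => simp at h
    | cons d u =>
      simp only [List.map_cons, List.cons.injEq] at h
      have hcd : c = d := by
        by_cases hc : c = a
        · exfalso; rw [if_pos hc] at h; exact (hb (h.1 ▸ List.mem_cons_self)).elim
        · rw [if_neg hc] at h; exact h.1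
      have := ih u h.2 (fun hm => hb (List.mem_cons_of_mem d hm))
      rw [hcd, this]

theorem infix_map_down (a b : Char) (tok l : List Char)
    (h : tok <:+: l.map (fun c => if c = a then b else c)) (hb : b ∉ tok) : tok <:+: l := by
  rcases h with ⟨pre, suf, hps⟩
  have hps' : l.map (fun c => if c = a then b else c) = pre ++ (tok ++ suf) := by
    rw [← hps]; simp [List.append_assoc]
  rcases List.map_eq_append_iff.mp hps' with ⟨l₁, l₂, hl, h1, h2⟩
  rcases List.map_eq_append_iff.mp h2 with ⟨m, l₃, hl2, hm, h3⟩
  have : m = tok := map_eq_self_of_no_b a b m tok hm hb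
  exact ⟨l₁, l₃, by rw [hl, hl2, this]; simp [List.append_assoc]⟩

theorem not_mem_map_a (a b : Char) (hab : a ≠ b) (l : List Char) :
    a ∉ l.map (fun c => if c = a then b else c) := by
  intro h
  rcases List.mem_map.mp h with ⟨c, _, hc⟩
  by_cases hca : c = a
  · rw [if_pos hca] at hc; exact hab hc.symm
  · rw [if_neg hca] at hc; exact hca hc

-- invariant bundle for normalized strings
def pvInv (cur : List Char) : Prop :=
  PySem.Chars.isIn "const".toList cur = false ∧
  PySem.Chars.isIn "struct".toList cur = false ∧
  PySem.Chars.isIn "(".toList cur = false ∧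
  PySem.Chars.strip cur = cur

theorem isIn_false_of_infix (tok big small : List Char)
    (h : PySem.Chars.isIn tok big = false) (hs : small <:+: big) :
    PySem.Chars.isIn tok small = false := by
  rw [PySem.Chars.isIn_eq_false_iff] at h ⊢
  exact fun hc => h (hc.trans hs)

theorem pvNorm_of_inv (cur : List Char) (h : pvInv cur) : pvNorm cur = cur := by
  obtain ⟨h1, h2, h3, h4⟩ := h
  rw [PySem.Chars.isIn_eq_false_iff] at h1 h2 h3
  unfold pvNorm
  rw [replace_no_occ _ _ _ h1 (by decide), replace_no_occ _ _ _ h2 (by decide),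
      replace_no_occ _ _ _ h3 (by decide), h4]

theorem pvInv_of_infix (cur small : List Char) (h : pvInv cur) (hs : small <:+: cur)
    (hstrip : PySem.Chars.strip small = small) : pvInv small :=
  ⟨isIn_false_of_infix _ _ _ h.1 hs, isIn_false_of_infix _ _ _ h.2.1 hs,
   isIn_false_of_infix _ _ _ h.2.2.1 hs, hstrip⟩

theorem slice_neg_one (l : List Char) :
    PySem.List.slice l none (some (-1)) = l.dropLast := by
  have := PySem.Str.slice_to_neg_one (String.ofList l)
  simpa [String.toList_ofList] using this

-- invariants of pvNorm s, given the Pre_ facts about the const/struct-removed string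
theorem pvInv_norm (s : List Char)
    (h1 : PySem.Chars.isIn "const".toList
      (PySem.Chars.replace (PySem.Chars.replace s "const".toList "".toList) "struct".toList "".toList) = false)
    (h2 : PySem.Chars.isIn "struct".toList
      (PySem.Chars.replace (PySem.Chars.replace s "const".toList "".toList) "struct".toList "".toList) = false) :
    pvInv (pvNorm s) := by
  set t := PySem.Chars.replace (PySem.Chars.replace s "const".toList "".toList) "struct".toList "".toList with ht
  have hmap : PySem.Chars.replace t "(".toList " ".toList
      = t.map (fun c => if c = '(' then ' ' else c) := by
    have e1 : "(".toList = ['('] := by decide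
    have e2 : " ".toList = [' '] := by decide
    rw [e1, e2, replace_single]
  have hline : pvNorm s = PySem.Chars.strip (t.map (fun c => if c = '(' then ' ' else c)) := by
    unfold pvNorm; rw [← ht, hmap]
  rw [PySem.Chars.isIn_eq_false_iff] at h1 h2
  refine ⟨?_, ?_, ?_, by rw [hline]; exact strip_idem _⟩
  · rw [PySem.Chars.isIn_eq_false_iff]
    intro hc
    rw [hline] at hc
    exact h1 (infix_map_down '(' ' ' _ _ (hc.trans (strip_infix _)) (by decide))
  · rw [PySem.Chars.isIn_eq_false_iff]
    intro hc
    rw [hline] at hc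
    exact h2 (infix_map_down '(' ' ' _ _ (hc.trans (strip_infix _)) (by decide))
  · rw [PySem.Chars.isIn_eq_false_iff]
    intro hc
    have hmem : '(' ∈ pvNorm s := by
      have : "(".toList = ['('] := by decide
      rw [this] at hc
      exact hc.sublist.mem (by simp)
    rw [hline] at hmem
    exact not_mem_map_a '(' ' ' (by decide) t ((strip_infix _).sublist.mem hmem)

theorem norm_length_le (s : List Char) : (pvNorm s).length ≤ s.length := by
  have e1 : "(".toList = ['('] := by decide
  have e2 : " ".toList = [' '] := by decide
  have e0 : "".toList = [] := by decide
  unfold pvNorm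
  rw [e0, e1, e2, replace_single]
  calc (PySem.Chars.strip ((PySem.Chars.replace (PySem.Chars.replace s "const".toList []) "struct".toList []).map _)).length
      ≤ ((PySem.Chars.replace (PySem.Chars.replace s "const".toList []) "struct".toList []).map
          (fun c => if c = '(' then ' ' else c)).length := strip_length_le _
    _ = (PySem.Chars.replace (PySem.Chars.replace s "const".toList []) "struct".toList []).length := by simp
    _ ≤ (PySem.Chars.replace s "const".toList []).length := replace_nil_length _ _ (by decide)
    _ ≤ s.length := replace_nil_length _ _ (by decide)

theorem bPeel_ge : ∀ (fuel : Nat) (cur : List Char) (w : Nat), w ≤ (bPeel fuel cur w).2 := by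
  intro fuel
  induction fuel with
  | zero => intro cur w; simp [bPeel]
  | succ n ih =>
    intro cur w
    simp only [bPeel]
    split
    · split
      · simp
      · split
        · simp
        · exact le_trans (Nat.le_succ w) (ih _ _)
    · simp

theorem pvWrap_zero (i : List Char) : pvWrap 0 i = i := by simp [pvWrap]

theorem pvWrap_succ (n : Nat) (i : List Char) :
    pvWrap (n + 1) i = "POINTER(".toList ++ pvWrap n i ++ ")".toList := by
  unfold pvWrap
  rw [List.replicate_succ (n := n) (a := "POINTER(".toList),
      List.replicate_succ' (n := n) (a := ')')]
  have : ")".toList = [')'] := by decide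
  simp [this, List.append_assoc]

theorem main_lemma : ∀ (fa : Nat) (fb : Nat) (cur : List Char) (w : Nat),
    cur.length < fa → cur.length < fb → pvInv cur →
    PySem.Chars.isIn "enum".toList cur = false →
    aGo fa cur = pvWrap ((bPeel fb cur w).2 - w) (bPeel fb cur w).1 := by
  intro fa
  induction fa with
  | zero => intro fb cur w h; omega
  | succ n ih =>
    intro fb cur w hfa hfb hinv henum
    obtain ⟨fb', rfl⟩ : ∃ k, fb = k + 1 := ⟨fb - 1, by omega⟩
    have hnorm : pvNorm cur = cur := pvNorm_of_inv cur hinv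
    simp only [aGo, bPeel, hnorm, henum, Bool.false_eq_true, if_false]
    by_cases hstar : PySem.Chars.endswith cur "*".toList = true
    · simp only [hstar, if_true]
      set base := PySem.Chars.strip (PySem.List.slice cur none (some (-1))) with hbase
      have hne : cur ≠ [] := by
        intro hnil
        rw [hnil] at hstar
        rw [PySem.Chars.endswith_iff] at hstar
        have := hstar.length_le
        simp at this
      have hblen : base.length < cur.length := by
        have h1 : base.length ≤ cur.dropLast.length := by
          rw [hbase, slice_neg_one]; exact strip_length_le _
        have : cur.dropLast.length = cur.length - 1 := by simp
        have hpos : 0 < cur.length := List.length_pos_iff.mpr hne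
        omega
      have hbinf : base <:+: cur := by
        rw [hbase, slice_neg_one]
        exact (strip_infix _).trans (List.dropLast_prefix cur).isInfix
      have hbinv : pvInv base := pvInv_of_infix cur base hinv hbinf (by rw [hbase]; exact strip_idem _)
      have hbenum : PySem.Chars.isIn "enum".toList base = false := isIn_false_of_infix _ _ _ henum hbinf
      by_cases hv : base = "void".toList
      · simp [hv, pvWrap_zero]
      · by_cases hc : base = "char".toList
        · simp [hc, pvWrap_zero]
        · simp only [hv, hc, if_false]
          rw [ih fb' base (w + 1) (by omega) (by omega) hbinv hbenum]
          have hge := bPeel_ge fb' base (w + 1)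
          have harith : (bPeel fb' base (w + 1)).2 - w = ((bPeel fb' base (w + 1)).2 - (w + 1)) + 1 := by omega
          rw [harith, pvWrap_succ]
    · simp only [Bool.not_eq_true] at hstar
      rw [show ("*".toList : List Char) = ['*'] from by decide] at hstar
      simp [hstar, pvWrap_zero]

theorem top_equal (s : String)
    (h1 : PySem.Str.isIn "const" (PySem.Str.replace (PySem.Str.replace s "const" "") "struct" "") = false)
    (h2 : PySem.Str.isIn "struct" (PySem.Str.replace (PySem.Str.replace s "const" "") "struct" "") = false) :
    c_to_py_type s = c_to_py_type_alt s := by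
  have h1' : PySem.Chars.isIn "const".toList
      (PySem.Chars.replace (PySem.Chars.replace s.toList "const".toList "".toList) "struct".toList "".toList) = false := by
    simpa using h1
  have h2' : PySem.Chars.isIn "struct".toList
      (PySem.Chars.replace (PySem.Chars.replace s.toList "const".toList "".toList) "struct".toList "".toList) = false := by
    simpa using h2
  have hinv : pvInv (pvNorm s.toList) := pvInv_norm s.toList h1' h2'
  have hcong : aGo (s.toList.length + 1) s.toList = aGo (s.toList.length + 1) (pvNorm s.toList) := by
    simp only [aGo]
    rw [pvNorm_of_inv _ hinv]
  by_cases henum : PySem.Chars.isIn "enum".toList (pvNorm s.toList) = true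
  · unfold c_to_py_type c_to_py_type_alt
    rw [hcong]
    simp only [aGo, pvNorm_of_inv _ hinv, henum, if_true]
    rfl
  · simp only [Bool.not_eq_true] at henum
    unfold c_to_py_type c_to_py_type_alt
    rw [hcong]
    simp only [henum, Bool.false_eq_true, if_false]
    rw [main_lemma (s.toList.length + 1) ((pvNorm s.toList).length + 1) (pvNorm s.toList) 0
        (by have := norm_length_le s.toList; omega) (by omega) hinv henum]
    simp

-- ===== VERDICT (by name: the statement is the Claim_ definition above) =====
theorem c_to_py_type_spec : Claim_equal_c_to_py_type := by
  intro s _hDom hPre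
  unfold Pre_c_to_py_type at hPre
  unfold Spec_c_to_py_type
  exact top_equal s hPre.1 hPre.2
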